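-- pv_equiv track=rewrite | github.com/hoj2atwit/Yapa-Bot-PY | formatter.py | text_formatter
-- ===== SOURCE A (Python) =====
-- def text_formatter(name):
--     currentPart = ""
--     formattedName = ""
--     #Iterates through name given
--     for x in range(len(name)):
--       #Checks if spacer Character has been run into
--       if(name[x] == "-"):
--         #Adds 's to formatted name text if the only character in current part is S
--         if(currentPart == "s"):
--           formattedName += "\'s"
--           currentPart = ""
--         else:
--         #Adds currentPart to formattedName and adds space as long as it is not the first word found
--           if(formattedName != ""):
--             formattedName += " ";
--           formattedName += currentPart;
--           currentPart = "";
--       else: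
--         #Adds next character to current part
--         currentPart += name[x]
--         #Capitalizes first letter in new part
--         if(len(currentPart) == 1):
--           currentPart = currentPart;
--           #Adds part to name if at the end of the name.
--         if(x == len(name)-1):
--           formattedName += " " + currentPart
--     return formattedName;
-- ===== SOURCE B (Python) =====
-- def text_formatter(name):
--     parts = name.split('-')
--     out = ""
--     for part in parts[:-1]:
--         if part == "s":
--             out += "'s"
--         else:
--             if out:
--                 out += " "
--             out += part
--     if parts[-1]:
--         out += " " + parts[-1]
--     return out
-- ===== Notes on version B (the rewrite author's own statement) =====
-- stated objective: idiomatic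
-- what changed: Replaces A's char-by-char index scan with its end-of-string check by token-level iteration over the hyphen-split parts: fold over all but the last part with the s-possessive/space rule, then append the final part with a leading space when non-empty.
import Mathlib
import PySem

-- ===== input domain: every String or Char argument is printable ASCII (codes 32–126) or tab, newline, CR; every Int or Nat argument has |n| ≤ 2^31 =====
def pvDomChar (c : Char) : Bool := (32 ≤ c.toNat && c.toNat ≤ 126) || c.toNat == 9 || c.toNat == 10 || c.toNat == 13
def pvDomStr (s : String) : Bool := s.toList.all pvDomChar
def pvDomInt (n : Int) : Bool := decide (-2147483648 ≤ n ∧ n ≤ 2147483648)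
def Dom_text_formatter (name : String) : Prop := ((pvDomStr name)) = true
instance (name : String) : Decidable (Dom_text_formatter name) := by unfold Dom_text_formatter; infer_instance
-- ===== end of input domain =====

-- B replaces A's char-by-char scan (with its end-of-string index check) by token-level
-- iteration over name.split('-'): simpler/more idiomatic, same exact output.

-- ===== PORT A =====
-- A's for-loop over indices, transliterated as structural recursion over the remaining
-- characters; 'x == len(name)-1' becomes 'rest = []' (the loop ends right after that step).
-- The no-op 'if len(currentPart)==1: currentPart = currentPart' is dropped.
def pvALoop : List Char → List Char → List Char → List Char
  | [], _cur, fmt => fmt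
  | c :: rest, cur, fmt =>
    if c = '-' then
      if cur = ['s'] then pvALoop rest [] (fmt ++ ['\'', 's'])
      else pvALoop rest [] ((if fmt ≠ [] then fmt ++ [' '] else fmt) ++ cur)
    else
      let cur' := cur ++ [c]
      if rest = [] then fmt ++ ' ' :: cur'
      else pvALoop rest cur' fmt

def text_formatter (name : String) : String := String.mk (pvALoop name.toList [] [])

-- ===== PORT B =====
-- body of Source B's loop over parts[:-1]
def pvBStep (out part : List Char) : List Char :=
  if part = ['s'] then out ++ ['\'', 's']
  else (if out ≠ [] then out ++ [' '] else out) ++ part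

def text_formatter_alt (name : String) : String :=
  let parts := name.toList.splitOn '-'          -- name.split('-')
  let out := (PySem.List.slice parts none (some (-1))).foldl pvBStep []   -- loop over parts[:-1]
  let last := (PySem.List.pyGet? parts (-1)).getD []                      -- parts[-1]
  String.mk (if last ≠ [] then out ++ ' ' :: last else out)

-- ===== PRECONDITION & SPEC =====
def Spec_text_formatter (name : String) (out : String) : Prop := out = text_formatter_alt name
instance (name : String) (out : String) : Decidable (Spec_text_formatter name out) := by unfold Spec_text_formatter; infer_instance

-- ===== CLAIM (what is proved, stated in full; the proofs are below) =====
def Claim_equal_text_formatter : Prop := ∀ (name : String), Dom_text_formatter name → Spec_text_formatter name (text_formatter name)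

-- ===== LEMMAS AND PROOFS =====

-- proof-side: B's computation on a nonempty parts list, as one recursion
def pvRunB (acc : List Char) : List (List Char) → List Char
  | [] => acc
  | [p] => if p ≠ [] then acc ++ ' ' :: p else acc
  | p :: q :: ps => pvRunB (pvBStep acc p) (q :: ps)

theorem pvRunB_eq_fold (parts : List (List Char)) (h : parts ≠ []) (acc : List Char) :
    pvRunB acc parts =
      (let out := parts.dropLast.foldl pvBStep acc
       let last := parts.getLast h
       if last ≠ [] then out ++ ' ' :: last else out) := by
  induction parts generalizing acc with
  | nil => simp at h
  | cons p ps ih =>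
    cases ps with
    | nil => simp [pvRunB]
    | cons q qs =>
      simp only [pvRunB, List.dropLast_cons_of_ne_nil (by simp : q :: qs ≠ []),
        List.foldl_cons, List.getLast_cons (by simp : q :: qs ≠ [])]
      exact ih (by simp) _

theorem pvModifyHead_id (l : List (List Char)) : l.modifyHead (fun x => [] ++ x) = l := by
  cases l <;> simp

theorem pvSplitOn_ne_nil (cs : List Char) : cs.splitOn '-' ≠ [] := by
  simp only [List.splitOn]; exact List.splitOnP_ne_nil _ _

theorem pvALoop_eq (cs : List Char) :
    ∀ cur fmt : List Char, (cs = [] → cur = []) →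
      pvALoop cs cur fmt = pvRunB fmt ((cs.splitOn '-').modifyHead (cur ++ ·)) := by
  induction cs with
  | nil =>
    intro cur fmt h
    simp [h rfl, pvALoop, List.splitOn, List.splitOnP_nil, pvRunB]
  | cons c rest ih =>
    intro cur fmt _
    by_cases hc : c = '-'
    · subst hc
      obtain ⟨p, ps, hps⟩ := List.exists_cons_of_ne_nil (pvSplitOn_ne_nil rest)
      have hstep : pvALoop ('-' :: rest) cur fmt = pvALoop rest [] (pvBStep fmt cur) := by
        by_cases hs : cur = ['s'] <;> simp [pvALoop, hs, pvBStep]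
      rw [hstep, ih [] (pvBStep fmt cur) (fun _ => rfl), pvModifyHead_id]
      have h2 : ('-' :: rest).splitOn '-' = [] :: rest.splitOn '-' := by
        simp [List.splitOn, List.splitOnP_cons]
      rw [h2, hps]
      simp [pvRunB, List.modifyHead]
    · have hsplit : (c :: rest).splitOn '-' = (rest.splitOn '-').modifyHead (c :: ·) := by
        simp [List.splitOn, List.splitOnP_cons, hc]
      by_cases hr : rest = []
      · subst hr
        simp only [pvALoop, if_neg hc]
        rw [hsplit]
        simp only [List.splitOn, List.splitOnP_nil, List.modifyHead]
        simp [pvRunB]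
      · have hA : pvALoop (c :: rest) cur fmt = pvALoop rest (cur ++ [c]) fmt := by
          simp [pvALoop, hc, hr]
        rw [hA, ih (cur ++ [c]) fmt (fun h => absurd h hr), hsplit]
        obtain ⟨p, ps, hps⟩ := List.exists_cons_of_ne_nil (pvSplitOn_ne_nil rest)
        rw [hps]
        simp [List.modifyHead]

theorem pvSlice_dropLast (l : List (List Char)) :
    PySem.List.slice l none (some (-1)) = l.dropLast := by
  simp [PySem.List.slice, PySem.List.clampIdx, List.dropLast_eq_take]
  split_ifs with h
  · simp [h]
  · omega

theorem pvGet_neg_one (l : List (List Char)) (h : l ≠ []) :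
    (PySem.List.pyGet? l (-1)).getD [] = l.getLast h := by
  have hl : 0 < l.length := List.length_pos_iff.mpr h
  have h1 : PySem.List.pyIdx? l.length (-1) = some (l.length - 1) := by
    have h0 : ¬ (0 ≤ (-1 : Int)) := by norm_num
    rw [PySem.List.pyIdx?, if_neg h0, if_pos (by omega : -(l.length : Int) ≤ -1)]
    norm_num
  simp [PySem.List.pyGet?, h1, ← List.getLast?_eq_getElem?,
    List.getLast?_eq_some_getLast h]

-- ===== VERDICT (by name: the statement is the Claim_ definition above) =====
theorem text_formatter_spec : Claim_equal_text_formatter := by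
  intro name _
  unfold Spec_text_formatter text_formatter text_formatter_alt
  have h := pvALoop_eq name.toList [] [] (fun _ => rfl)
  rw [h, pvModifyHead_id]
  have hne : name.toList.splitOn '-' ≠ [] := pvSplitOn_ne_nil _
  rw [pvRunB_eq_fold _ hne]
  simp only [pvSlice_dropLast, pvGet_neg_one _ hne]
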